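-- pv_equiv track=rewrite | github.com/simeonhebrew/inviria | sylph_uhgv_host.py | categorize_taxonomy
-- ===== SOURCE A (Python) =====
-- def categorize_taxonomy(clade_name):
--     # Replace all commas with pipes first
--     clade_name = clade_name.replace(',', '|')
--
--     # Split the clade_name by the '|' character
--     terms = clade_name.split('|')
--
--     # Define the categories (keep both previous and new categories)
--     categories = {
--         'Realm': [],
--         'Kingdom': [],
--         'Phylum': [],
--         'Class': [],
--         'Order': [],
--         'Family': [],
--         'Genus': [],
--         'Contigs': [],  # Only keep 'Contigs' here
--         'Host_Bacteria': [],
--         'Host_Phylum': [],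
--         'Host_Class': [],
--         'Host_Order': [],
--         'Host_Family': [],
--         'Host_Genus': [],
--         'Host_Species': [],
--         'Lifestyle': [],
--     }
--
--     # Iterate over each term and categorize it based on the rules
--     for term in terms:
--         # Check for lifestyle terms
--         if 'lytic' in term or 'temperate' in term:
--             categories['Lifestyle'].append(term)
--
--         # Check for specific prefixes and assign to appropriate category
--         elif term.startswith('d__'):
--             categories['Host_Bacteria'].append(term)
--         elif term.startswith('p__'):
--             categories['Host_Phylum'].append(term)
--         elif term.startswith('c__'):
--             categories['Host_Class'].append(term)
--         elif term.startswith('o__'):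
--             categories['Host_Order'].append(term)
--         elif term.startswith('f__'):
--             categories['Host_Family'].append(term)
--         elif term.startswith('g__'):
--             categories['Host_Genus'].append(term)
--         elif term.startswith('s__'):
--             categories['Host_Species'].append(term)
--
--         # Assign terms to previous taxonomy categories based on suffixes
--         elif term.endswith('ia'):
--             categories['Realm'].append(term)
--         elif term.endswith('virae'):
--             categories['Kingdom'].append(term)
--         elif term.endswith('ota'):
--             categories['Phylum'].append(term)
--         elif term.endswith('etes'):
--             categories['Class'].append(term)
--         elif term.endswith('ales'):
--             categories['Order'].append(term)
--         elif term.endswith('viridae'):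
--             categories['Family'].append(term)
--         elif term.endswith('virus'):
--             categories['Genus'].append(term)
--
--         # Add to Contigs if 'UHGV' is in the term
--         if 'UHGV' in term:
--             categories['Contigs'].append(term)
--
--     return categories
-- ===== SOURCE B (Python) =====
-- # Table-driven re-implementation: classify each term once via static tables,
-- # then build each category bucket with its own filter pass.
--
-- KEYS = ['Realm', 'Kingdom', 'Phylum', 'Class', 'Order', 'Family', 'Genus',
--         'Contigs', 'Host_Bacteria', 'Host_Phylum', 'Host_Class', 'Host_Order',
--         'Host_Family', 'Host_Genus', 'Host_Species', 'Lifestyle']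
--
-- PREFIXES = {'d__': 'Host_Bacteria', 'p__': 'Host_Phylum', 'c__': 'Host_Class',
--             'o__': 'Host_Order', 'f__': 'Host_Family', 'g__': 'Host_Genus',
--             's__': 'Host_Species'}
--
-- SUFFIXES = [('ia', 'Realm'), ('virae', 'Kingdom'), ('ota', 'Phylum'),
--             ('etes', 'Class'), ('ales', 'Order'), ('viridae', 'Family'),
--             ('virus', 'Genus')]
--
-- def classify(term):
--     if 'lytic' in term or 'temperate' in term:
--         return 'Lifestyle'
--     cat = PREFIXES.get(term[:3])
--     if cat is not None:
--         return cat
--     for suf, c in SUFFIXES: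
--         if term.endswith(suf):
--             return c
--     return None
--
-- def categorize_taxonomy(clade_name):
--     terms = clade_name.replace(',', '|').split('|')
--     result = {}
--     for key in KEYS:
--         if key == 'Contigs':
--             result[key] = [t for t in terms if 'UHGV' in t]
--         else:
--             result[key] = [t for t in terms if classify(t) == key]
--     return result
-- ===== Notes on version B (the rewrite author's own statement) =====
-- stated objective: idiomatic
-- what changed: A's single pass with a 15-branch elif chain mutating dict buckets is replaced by a table-driven classifier (prefix dict on term[:3] plus ordered suffix table) and one independent filter pass per category bucket.
import Mathlib
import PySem

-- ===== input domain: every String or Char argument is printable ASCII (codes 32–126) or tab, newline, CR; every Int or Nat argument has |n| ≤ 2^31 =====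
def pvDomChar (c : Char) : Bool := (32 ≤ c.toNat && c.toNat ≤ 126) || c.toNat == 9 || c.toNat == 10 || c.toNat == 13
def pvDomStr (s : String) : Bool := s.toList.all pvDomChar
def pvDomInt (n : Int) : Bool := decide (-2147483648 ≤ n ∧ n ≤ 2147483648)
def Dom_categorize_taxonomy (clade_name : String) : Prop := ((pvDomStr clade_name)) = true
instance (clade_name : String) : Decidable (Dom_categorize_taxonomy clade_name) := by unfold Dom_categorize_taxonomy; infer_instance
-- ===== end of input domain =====

-- B replaces A's 15-branch elif chain by static prefix/suffix tables and builds each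
-- category bucket with its own filter pass (objective: idiomatic, table-driven; not faster).

-- ===== PORT A =====
-- the elif chain of A (everything except the final independent 'UHGV' check)
def pvStep1 (categories : PySem.Dict String (List String)) (term : String) :
    PySem.Dict String (List String) :=
  if PySem.Str.isIn "lytic" term || PySem.Str.isIn "temperate" term then
    categories.modify "Lifestyle" [] (· ++ [term])
  else if PySem.Str.startswith term "d__" then categories.modify "Host_Bacteria" [] (· ++ [term])
  else if PySem.Str.startswith term "p__" then categories.modify "Host_Phylum" [] (· ++ [term])
  else if PySem.Str.startswith term "c__" then categories.modify "Host_Class" [] (· ++ [term])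
  else if PySem.Str.startswith term "o__" then categories.modify "Host_Order" [] (· ++ [term])
  else if PySem.Str.startswith term "f__" then categories.modify "Host_Family" [] (· ++ [term])
  else if PySem.Str.startswith term "g__" then categories.modify "Host_Genus" [] (· ++ [term])
  else if PySem.Str.startswith term "s__" then categories.modify "Host_Species" [] (· ++ [term])
  else if PySem.Str.endswith term "ia" then categories.modify "Realm" [] (· ++ [term])
  else if PySem.Str.endswith term "virae" then categories.modify "Kingdom" [] (· ++ [term])
  else if PySem.Str.endswith term "ota" then categories.modify "Phylum" [] (· ++ [term])
  else if PySem.Str.endswith term "etes" then categories.modify "Class" [] (· ++ [term])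
  else if PySem.Str.endswith term "ales" then categories.modify "Order" [] (· ++ [term])
  else if PySem.Str.endswith term "viridae" then categories.modify "Family" [] (· ++ [term])
  else if PySem.Str.endswith term "virus" then categories.modify "Genus" [] (· ++ [term])
  else categories

-- one iteration of A's loop body: the chain, then the independent 'UHGV' append
def pvStepA (categories : PySem.Dict String (List String)) (term : String) :
    PySem.Dict String (List String) :=
  let categories := pvStep1 categories term
  if PySem.Str.isIn "UHGV" term then categories.modify "Contigs" [] (· ++ [term]) else categories

def pvCatsInit : PySem.Dict String (List String) :=
  PySem.Dict.ofList
    [("Realm", []), ("Kingdom", []), ("Phylum", []), ("Class", []), ("Order", []),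
     ("Family", []), ("Genus", []), ("Contigs", []), ("Host_Bacteria", []),
     ("Host_Phylum", []), ("Host_Class", []), ("Host_Order", []), ("Host_Family", []),
     ("Host_Genus", []), ("Host_Species", []), ("Lifestyle", [])]

-- '|' is a nonempty separator, so split? never returns none; .getD [] only totalizes
def categorize_taxonomy (clade_name : String) : List (String × List String) :=
  (((PySem.Str.split? (PySem.Str.replace clade_name "," "|") "|").getD []).foldl
    pvStepA pvCatsInit).items

-- ===== PORT B =====
def pvKeys : List String :=
  ["Realm", "Kingdom", "Phylum", "Class", "Order", "Family", "Genus", "Contigs",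
   "Host_Bacteria", "Host_Phylum", "Host_Class", "Host_Order", "Host_Family",
   "Host_Genus", "Host_Species", "Lifestyle"]

def pvPrefixes : PySem.Dict String String :=
  PySem.Dict.ofList
    [("d__", "Host_Bacteria"), ("p__", "Host_Phylum"), ("c__", "Host_Class"),
     ("o__", "Host_Order"), ("f__", "Host_Family"), ("g__", "Host_Genus"),
     ("s__", "Host_Species")]

def pvSuffixes : List (String × String) :=
  [("ia", "Realm"), ("virae", "Kingdom"), ("ota", "Phylum"), ("etes", "Class"),
   ("ales", "Order"), ("viridae", "Family"), ("virus", "Genus")]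

-- the 'for suf, c in SUFFIXES' loop of Source B's classify
def pvSufLoop : List (String × String) → String → Option String
  | [], _ => none
  | (suf, c) :: rest, term =>
    if PySem.Str.endswith term suf then some c else pvSufLoop rest term

def pvClassify (term : String) : Option String :=
  if PySem.Str.isIn "lytic" term || PySem.Str.isIn "temperate" term then some "Lifestyle"
  else
    match pvPrefixes.get? (PySem.Str.slice term none (some 3)) with
    | some cat => some cat
    | none => pvSufLoop pvSuffixes term

-- the 'for key in KEYS' result-building loop of Source B
def pvAltBuild (terms : List String) : List (String × List String) :=
  (pvKeys.foldl (fun result key =>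
      result.insert key
        (if key == "Contigs" then terms.filter (fun t => PySem.Str.isIn "UHGV" t)
         else terms.filter (fun t => pvClassify t == some key)))
    PySem.Dict.empty).items

def categorize_taxonomy_alt (clade_name : String) : List (String × List String) :=
  pvAltBuild ((PySem.Str.split? (PySem.Str.replace clade_name "," "|") "|").getD [])

-- ===== PRECONDITION & SPEC =====
def Spec_categorize_taxonomy (clade_name : String) (out : List (String × List String)) : Prop := out = categorize_taxonomy_alt clade_name
instance (clade_name : String) (out : List (String × List String)) : Decidable (Spec_categorize_taxonomy clade_name out) := by unfold Spec_categorize_taxonomy; infer_instance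

-- ===== CLAIM (what is proved, stated in full; the proofs are below) =====
def Claim_equal_categorize_taxonomy : Prop := ∀ (clade_name : String), Dom_categorize_taxonomy clade_name → Spec_categorize_taxonomy clade_name (categorize_taxonomy clade_name)

-- ===== LEMMAS AND PROOFS =====

-- the dict with keys pvKeys and bucket k = g k
def pvMkD (g : String → List String) : PySem.Dict String (List String) :=
  PySem.Dict.mk (pvKeys.map (fun k => (k, g k)))

-- A's elif chain as ordered (condition, category) data
def pvRules (t : String) : List (Bool × String) :=
  [(PySem.Str.isIn "lytic" t || PySem.Str.isIn "temperate" t, "Lifestyle"),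
   (PySem.Str.startswith t "d__", "Host_Bacteria"),
   (PySem.Str.startswith t "p__", "Host_Phylum"),
   (PySem.Str.startswith t "c__", "Host_Class"),
   (PySem.Str.startswith t "o__", "Host_Order"),
   (PySem.Str.startswith t "f__", "Host_Family"),
   (PySem.Str.startswith t "g__", "Host_Genus"),
   (PySem.Str.startswith t "s__", "Host_Species"),
   (PySem.Str.endswith t "ia", "Realm"),
   (PySem.Str.endswith t "virae", "Kingdom"),
   (PySem.Str.endswith t "ota", "Phylum"),
   (PySem.Str.endswith t "etes", "Class"),
   (PySem.Str.endswith t "ales", "Order"),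
   (PySem.Str.endswith t "viridae", "Family"),
   (PySem.Str.endswith t "virus", "Genus")]

def pvFirst : List (Bool × String) → Option String
  | [] => none
  | (b, c) :: rest => if b then some c else pvFirst rest

def pvApply (cats : PySem.Dict String (List String)) (t : String) :
    List (Bool × String) → PySem.Dict String (List String)
  | [] => cats
  | (b, c) :: rest => if b then cats.modify c [] (· ++ [t]) else pvApply cats t rest

def pvPred (k t : String) : Bool :=
  if k == "Contigs" then PySem.Str.isIn "UHGV" t else pvClassify t == some k

lemma pvStep1_eq_apply (cats : PySem.Dict String (List String)) (t : String) :
    pvStep1 cats t = pvApply cats t (pvRules t) := by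
  simp only [pvStep1, pvApply, pvRules]

lemma pvRules_sound (t : String) :
    ∀ r ∈ pvRules t, r.2 ∈ pvKeys ∧ r.2 ≠ "Contigs" := by
  intro r hr
  simp only [pvRules, List.mem_cons, List.not_mem_nil, or_false] at hr
  rcases hr with rfl|rfl|rfl|rfl|rfl|rfl|rfl|rfl|rfl|rfl|rfl|rfl|rfl|rfl|rfl
  all_goals exact ⟨by simp [pvKeys], by simp⟩

lemma pvFind?_map_assoc (ks : List String) (g : String → List String) (k0 : String)
    (h : k0 ∈ ks) :
    List.find? (fun p => p.1 == k0) (ks.map (fun k => (k, g k))) = some (k0, g k0) := by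
  induction ks with
  | nil => cases h
  | cons k ks ih =>
    by_cases hk : k = k0
    · subst hk; simp
    · have hb : (k == k0) = false := beq_eq_false_iff_ne.mpr hk
      simp only [List.map, List.find?, hb]
      exact ih (by cases h with | head => exact absurd rfl hk | tail _ h => exact h)

lemma pvContains_mkD (g : String → List String) (k0 : String) (h : k0 ∈ pvKeys) :
    (pvMkD g).contains k0 = true := by
  simp only [PySem.Dict.contains, pvMkD, List.any_eq_true]
  exact ⟨(k0, g k0), List.mem_map_of_mem h, by simp⟩

lemma pvModify_mkD (g : String → List String) (k0 : String) (h : k0 ∈ pvKeys)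
    (f : List String → List String) :
    (pvMkD g).modify k0 [] f = pvMkD (fun k => if k == k0 then f (g k) else g k) := by
  have hget : (pvMkD g).getD k0 [] = g k0 := by
    simp only [PySem.Dict.getD, PySem.Dict.get?, pvMkD, pvFind?_map_assoc pvKeys g k0 h,
      Option.map_some, Option.getD_some]
  simp only [PySem.Dict.modify, PySem.Dict.insert, pvContains_mkD g k0 h, if_pos, hget]
  simp only [pvMkD, List.map_map, PySem.Dict.mk.injEq]
  apply List.map_congr_left
  intro k _
  by_cases hk : k = k0
  · subst hk; simp
  · simp [Function.comp, beq_eq_false_iff_ne.mpr hk]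

lemma pvApply_mkD (g : String → List String) (t : String) (rs : List (Bool × String))
    (hs : ∀ r ∈ rs, r.2 ∈ pvKeys ∧ r.2 ≠ "Contigs") :
    pvApply (pvMkD g) t rs =
      (match pvFirst rs with
       | some c => pvMkD (fun k => if k == c then g k ++ [t] else g k)
       | none => pvMkD g) := by
  induction rs with
  | nil => rfl
  | cons r rest ih =>
    obtain ⟨b, c⟩ := r
    have hc := (hs (b, c) (List.mem_cons_self)).1
    cases b with
    | true =>
      simp only [pvApply, pvFirst, if_pos]
      exact pvModify_mkD g c hc _
    | false =>
      simp only [pvApply, pvFirst, Bool.false_eq_true, if_false]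
      exact ih (fun r hr => hs r (List.mem_cons_of_mem _ hr))

lemma pvFirst_mem (rs : List (Bool × String)) (c : String) (h : pvFirst rs = some c) :
    ∃ b, (b, c) ∈ rs := by
  induction rs with
  | nil => cases h
  | cons r rest ih =>
    obtain ⟨b, c'⟩ := r
    by_cases hb : b = true
    · subst hb
      simp only [pvFirst, if_pos] at h
      exact ⟨true, by simp [Option.some.inj h]⟩
    · simp only [pvFirst, if_neg hb] at h
      obtain ⟨b', hb'⟩ := ih h
      exact ⟨b', List.mem_cons_of_mem _ hb'⟩

lemma pvPrefix3 (p t : String) (hp : p.toList.length = 3) :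
    (p == PySem.Str.slice t none (some 3)) = PySem.Str.startswith t p := by
  have hsl : (PySem.Str.slice t none (some 3)).toList = t.toList.take 3 := by
    simp only [PySem.Str.toList_slice, PySem.Chars.slice_eq_listSlice]
    rw [PySem.List.slice_to _ (by norm_num : (0:Int) ≤ 3)]
    rfl
  cases h : PySem.Str.startswith t p with
  | true =>
    have hpre : p.toList <+: t.toList := by
      rw [PySem.Str.startswith_eq] at h
      exact (PySem.Chars.startswith_iff _ _).mp h
    have htake : t.toList.take 3 = p.toList := by
      obtain ⟨r, hr⟩ := hpre
      rw [← hr, ← hp, List.take_left]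
    have hpe : p = PySem.Str.slice t none (some 3) :=
      String.toList_inj.mp (by rw [hsl, htake])
    simp [← hpe]
  | false =>
    apply beq_eq_false_iff_ne.mpr
    intro hpe
    have hpre : p.toList <+: t.toList := by
      rw [hpe, hsl]; exact List.take_prefix 3 t.toList
    have : PySem.Str.startswith t p = true := by
      rw [PySem.Str.startswith_eq]
      exact (PySem.Chars.startswith_iff _ _).mpr hpre
    rw [h] at this; cases this

lemma pvFirst_append (xs ys : List (Bool × String)) :
    pvFirst (xs ++ ys) =
      (match pvFirst xs with
       | some c => some c
       | none => pvFirst ys) := by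
  induction xs with
  | nil => rfl
  | cons x xs ih =>
    obtain ⟨b, c⟩ := x
    cases b <;> simp [pvFirst, ih]

lemma pvPrefixes_items :
    pvPrefixes.items =
      [("d__", "Host_Bacteria"), ("p__", "Host_Phylum"), ("c__", "Host_Class"),
       ("o__", "Host_Order"), ("f__", "Host_Family"), ("g__", "Host_Genus"),
       ("s__", "Host_Species")] := by decide

lemma pvFind?_eq_first (ps : List (String × String)) (t : String)
    (h3 : ∀ p ∈ ps, p.1.toList.length = 3) :
    Option.map (fun x => x.2)
        (List.find? (fun p => p.1 == PySem.Str.slice t none (some 3)) ps) =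
      pvFirst (ps.map (fun p => (PySem.Str.startswith t p.1, p.2))) := by
  induction ps with
  | nil => rfl
  | cons p ps ih =>
    simp only [List.find?, List.map, pvFirst,
      pvPrefix3 p.1 t (h3 p List.mem_cons_self)]
    cases hsw : PySem.Str.startswith t p.1 <;>
      simp [ih (fun q hq => h3 q (List.mem_cons_of_mem _ hq))]

lemma pvClassify_eq_first (t : String) : pvClassify t = pvFirst (pvRules t) := by
  unfold pvClassify
  cases hL : (PySem.Str.isIn "lytic" t || PySem.Str.isIn "temperate" t) with
  | true => simp only [pvRules, pvFirst, hL]; rfl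
  | false =>
    have hrules : pvRules t =
        (PySem.Str.isIn "lytic" t || PySem.Str.isIn "temperate" t, "Lifestyle") ::
          (pvPrefixes.items.map (fun p => (PySem.Str.startswith t p.1, p.2)) ++
            [(PySem.Str.endswith t "ia", "Realm"), (PySem.Str.endswith t "virae", "Kingdom"),
             (PySem.Str.endswith t "ota", "Phylum"), (PySem.Str.endswith t "etes", "Class"),
             (PySem.Str.endswith t "ales", "Order"), (PySem.Str.endswith t "viridae", "Family"),
             (PySem.Str.endswith t "virus", "Genus")]) := by
      rw [pvPrefixes_items]; rfl
    rw [hrules]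
    simp only [pvFirst, hL, Bool.false_eq_true, if_false, pvFirst_append]
    rw [PySem.Dict.get?, ← pvFind?_eq_first _ t (by
      rw [pvPrefixes_items]; intro p hp
      simp only [List.mem_cons, List.not_mem_nil, or_false] at hp
      rcases hp with rfl|rfl|rfl|rfl|rfl|rfl|rfl <;> decide)]
    cases List.find? (fun p => p.1 == PySem.Str.slice t none (some 3)) pvPrefixes.items with
    | none => rfl
    | some q => rfl

lemma pvStepA_eq (g : String → List String) (t : String) :
    pvStepA (pvMkD g) t = pvMkD (fun k => g k ++ if pvPred k t then [t] else []) := by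
  unfold pvStepA
  rw [pvStep1_eq_apply, pvApply_mkD g t _ (pvRules_sound t)]
  cases hC : pvFirst (pvRules t) with
  | none =>
    cases hU : PySem.Str.isIn "UHGV" t with
    | false =>
      simp only [Bool.false_eq_true, if_false]
      congr 1; funext k
      by_cases hk : k = "Contigs" <;>
        simp_all [pvPred, pvClassify_eq_first]
    | true =>
      simp only [if_pos]
      rw [pvModify_mkD _ "Contigs" (by decide)]
      congr 1; funext k
      by_cases hk : k = "Contigs" <;>
        simp_all [pvPred, pvClassify_eq_first]
  | some c =>
    obtain ⟨b, hb⟩ := pvFirst_mem _ _ hC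
    have hcK : c ∈ pvKeys ∧ c ≠ "Contigs" := by
      simpa using pvRules_sound t (b, c) hb
    cases hU : PySem.Str.isIn "UHGV" t with
    | false =>
      simp only [Bool.false_eq_true, if_false]
      congr 1; funext k
      by_cases hk : k = "Contigs" <;> by_cases hkc : k = c <;>
        simp_all [pvPred, pvClassify_eq_first] <;>
          exact fun h => hkc h.symm
    | true =>
      simp only [if_pos]
      rw [pvModify_mkD _ "Contigs" (by decide)]
      congr 1; funext k
      by_cases hk : k = "Contigs" <;> by_cases hkc : k = c <;>
        simp_all [pvPred, pvClassify_eq_first] <;>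
          exact fun h => hkc h.symm

lemma pvFoldl_eq (ts : List String) (g : String → List String) :
    ts.foldl pvStepA (pvMkD g) = pvMkD (fun k => g k ++ ts.filter (fun t => pvPred k t)) := by
  induction ts generalizing g with
  | nil => simp
  | cons t ts ih =>
    simp only [List.foldl_cons, pvStepA_eq]
    rw [ih]
    congr 1; funext k
    by_cases h : pvPred k t = true <;> simp [h]

lemma pvCatsInit_eq : pvCatsInit = pvMkD (fun _ => []) := by decide

-- ===== VERDICT (by name: the statement is the Claim_ definition above) =====
theorem categorize_taxonomy_spec : Claim_equal_categorize_taxonomy := by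
  intro clade_name _
  unfold Spec_categorize_taxonomy categorize_taxonomy categorize_taxonomy_alt pvAltBuild
  rw [pvCatsInit_eq, pvFoldl_eq]
  rw [PySem.Dict.items_foldl_insert_fresh _ (fun key => key) _ PySem.Dict.empty
    (fun a _ => PySem.Dict.contains_empty a) (by simp; decide)]
  simp only [PySem.Dict.empty, pvMkD, List.nil_append]
  apply List.map_congr_left
  intro k _
  by_cases hk : k = "Contigs"
  · subst hk; simp [pvPred]
  · simp [pvPred, beq_eq_false_iff_ne.mpr hk]
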